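-- pv_equiv track=rewrite | github.com/MrBrantCode/unitest_baseline | mut_generate/mist_train_cf/cf_13559/solution.py | find_word_index
-- ===== SOURCE A (Python) =====
-- def find_word_index(text, word):
--     # Convert both the text and word to lowercase for case-insensitive comparison
--     text = text.lower()
--     word = word.lower()
--
--     # Find the index of the word in the text
--     index = text.find(word)
--
--     # Handle cases where the word is followed by punctuation marks or is part of a larger word
--     while index != -1:
--         # Check if the word is at the start of the text or is preceded by a space
--         if index == 0 or text[index - 1] == ' ':
--             # Check if the word is at the end of the text or is followed by a punctuation mark or a space
--             if index + len(word) == len(text) or text[index + len(word)] in (' ', ',', '.', '!', '?'):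
--                 return index
--
--         # Find the next occurrence of the word in the text
--         index = text.find(word, index + 1)
--
--     # Return -1 if the word is not found in the text
--     return -1
-- ===== SOURCE B (Python) =====
-- def find_word_index(text, word):
--     # One pass to precompute the word-start candidates (0 and every position
--     # after a space), then return the first candidate that begins the word
--     # with a valid right boundary.
--     text = text.lower()
--     word = word.lower()
--     n, m = len(text), len(word)
--     starts = [0] + [i + 1 for i, ch in enumerate(text) if ch == ' ']
--     for c in starts:
--         if text.startswith(word, c) and (c + m == n or text[c + m] in (' ', ',', '.', '!', '?')):
--             return c
--     return -1
-- ===== Notes on version B (the rewrite author's own statement) =====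
-- stated objective: alternative
-- what changed: B replaces A's repeated str.find scan over all substring occurrences with a single pass that precomputes the valid word-start candidates (0 and each position after a space) and returns the first candidate where the word starts with a valid right boundary.
import Mathlib
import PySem

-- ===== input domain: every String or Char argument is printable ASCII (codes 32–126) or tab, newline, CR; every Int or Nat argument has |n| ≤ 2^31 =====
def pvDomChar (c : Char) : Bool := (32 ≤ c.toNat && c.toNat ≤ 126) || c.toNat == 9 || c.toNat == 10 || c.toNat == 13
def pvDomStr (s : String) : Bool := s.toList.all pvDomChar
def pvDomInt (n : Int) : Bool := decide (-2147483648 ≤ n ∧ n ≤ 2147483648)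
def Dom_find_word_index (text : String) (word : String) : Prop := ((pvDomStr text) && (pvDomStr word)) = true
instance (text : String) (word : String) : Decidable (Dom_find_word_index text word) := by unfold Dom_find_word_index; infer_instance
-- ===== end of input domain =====

-- B replaces A's repeated str.find scan with one precomputed list of valid
-- word-start candidates (0 and each position after a space); alternative
-- decomposition, same worst-case cost.

-- ===== PORT A =====

-- `text[i] in (' ', ',', '.', '!', '?')`
def pvPunct (c : Char) : Bool := c == ' ' || c == ',' || c == '.' || c == '!' || c == '?'

-- CPython quirk (kept by PySem.Chars.findFrom): a start past len(s) gives -1.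
-- Needed for the termination of A's while-loop.
theorem pvFindFrom_gt_len (s sub : List Char) (k : Int) (h : (s.length : Int) < k) :
    PySem.Chars.findFrom s sub k = -1 := by
  simp only [PySem.Chars.findFrom]
  split
  · exfalso; omega
  · rfl

theorem pvNext_gt (t w : List Char) (i : Nat)
    (h : PySem.Chars.findFrom t w ((i : Int) + 1) ≠ -1) :
    i < (PySem.Chars.findFrom t w ((i : Int) + 1)).toNat := by
  by_cases hle : i + 1 ≤ t.length
  · have hcast : ((i : Int) + 1) = ((i + 1 : Nat) : Int) := by push_cast; ring
    rw [hcast] at h ⊢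
    have hs := PySem.Chars.findFrom_natCast_spec t w (i + 1) hle h
    omega
  · exact absurd (pvFindFrom_gt_len t w _ (by omega)) h

theorem pvNext_le (t w : List Char) (i : Nat)
    (h : PySem.Chars.findFrom t w ((i : Int) + 1) ≠ -1) :
    (PySem.Chars.findFrom t w ((i : Int) + 1)).toNat ≤ t.length := by
  by_cases hle : i + 1 ≤ t.length
  · have hcast : ((i : Int) + 1) = ((i + 1 : Nat) : Int) := by push_cast; ring
    rw [hcast] at h ⊢
    rw [PySem.Chars.findFrom_natCast t w (i + 1) hle] at h ⊢
    split at h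
    · exact absurd rfl h
    · rename_i hne
      split
      · omega
      · have h1 := PySem.Chars.find_le_length (List.drop (i + 1) t) w
        have h2 : (List.drop (i + 1) t).length = t.length - (i + 1) := by simp
        rw [h2] at h1
        omega
  · exact absurd (pvFindFrom_gt_len t w _ (by omega)) h

-- A's while-loop: `index` is always a find/findFrom result, so the two
-- character reads (at index-1 and index+len(word)) are in range whenever
-- they are reached; `getD` with a dummy default transcribes them.
def findA_loop (t w : List Char) (i : Nat) : Int :=
  if (i == 0 || t.getD (i - 1) ' ' == ' ') &&
     ((i + w.length == t.length) || pvPunct (t.getD (i + w.length) ' ')) then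
    (i : Int)
  else
    let next := PySem.Chars.findFrom t w ((i : Int) + 1)
    if h : next = -1 then -1
    else findA_loop t w next.toNat
termination_by t.length + 1 - i
decreasing_by
  have h1 := pvNext_gt t w i h
  have h2 := pvNext_le t w i h
  omega

def find_word_index (text : String) (word : String) : Int :=
  let t := PySem.Chars.lower text.toList
  let w := PySem.Chars.lower word.toList
  let index := PySem.Chars.find t w
  if index = -1 then -1 else findA_loop t w index.toNat

-- ===== PORT B =====

-- the for-loop of B: first candidate c passing the test, else -1
def findB_loop (t w : List Char) (cs : List Int) : Int :=
  match cs with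
  | [] => -1
  | c :: rest =>
    if PySem.Chars.startswith (List.drop c.toNat t) w &&
       ((c + (w.length : Int) == (t.length : Int)) || pvPunct (t.getD (c.toNat + w.length) ' ')) then
      c
    else findB_loop t w rest

def find_word_index_alt (text : String) (word : String) : Int :=
  let t := PySem.Chars.lower text.toList
  let w := PySem.Chars.lower word.toList
  let starts : List Int :=
    0 :: ((PySem.List.enumerate t).filter (fun p => p.2 == ' ')).map (fun p => p.1 + 1)
  findB_loop t w starts

-- ===== PRECONDITION & SPEC =====
def Spec_find_word_index (text : String) (word : String) (out : Int) : Prop := out = find_word_index_alt text word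
instance (text : String) (word : String) (out : Int) : Decidable (Spec_find_word_index text word out) := by unfold Spec_find_word_index; infer_instance

-- ===== CLAIM (what is proved, stated in full; the proofs are below) =====
def Claim_equal_find_word_index : Prop := ∀ (text : String) (word : String), Dom_find_word_index text word → Spec_find_word_index text word (find_word_index text word)

-- ===== LEMMAS AND PROOFS =====

theorem pvStartswith_iff (s w : List Char) :
    PySem.Chars.startswith s w = true ↔ w <+: s := by
  simp [PySem.Chars.startswith, List.isPrefixOf_iff_prefix]

-- left-boundary condition: c = 0 or preceded by a space
def pvLeft (t : List Char) (c : Nat) : Bool := c == 0 || t.getD (c - 1) ' ' == ' '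

-- B's per-candidate test: the word starts at c with a valid right boundary
def pvCheck (t w : List Char) (c : Nat) : Bool :=
  PySem.Chars.startswith (List.drop c t) w &&
  ((c + w.length == t.length) || pvPunct (t.getD (c + w.length) ' '))

def pvP (t w : List Char) (c : Nat) : Bool := pvLeft t c && pvCheck t w c

-- the reference value: the first c ≥ i (c ≤ len) with pvP, else -1
def pvAns (t w : List Char) (i : Nat) : Int :=
  match (List.range' i (t.length + 1 - i)).find? (pvP t w) with
  | some c => (c : Int)
  | none => -1

theorem pvAns_skip (t w : List Char) (i j : Nat) (hij : i ≤ j) (hj : j ≤ t.length + 1)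
    (hfail : ∀ c, i ≤ c → c < j → pvP t w c = false) :
    pvAns t w i = pvAns t w j := by
  unfold pvAns
  have hsplit : List.range' i (t.length + 1 - i) =
      List.range' i (j - i) ++ List.range' j (t.length + 1 - j) := by
    have h0 := (@List.range'_append i (j - i) (t.length + 1 - j) 1).symm
    rw [show i + 1 * (j - i) = j by omega] at h0
    rw [show (j - i) + (t.length + 1 - j) = t.length + 1 - i by omega] at h0
    exact h0
  rw [hsplit, List.find?_append]
  have hnone : (List.range' i (j - i)).find? (pvP t w) = none := by
    rw [List.find?_eq_none]
    intro x hx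
    rw [List.mem_range'] at hx
    obtain ⟨k, hk, rfl⟩ := hx
    simp only [Nat.mul_one] at *
    simp [hfail (i + k) (by omega) (by omega)]
  rw [hnone, Option.none_or]

-- no occurrence at or after position k kills pvP there
theorem pvP_false_of_no_occ (t w : List Char) (k c : Nat) (hkc : k ≤ c)
    (hno : ¬ w <:+: List.drop k t) : pvP t w c = false := by
  have hocc : PySem.Chars.startswith (List.drop c t) w = false := by
    rw [Bool.eq_false_iff, Ne, pvStartswith_iff]
    intro hpre
    have hdd : List.drop c t = List.drop (c - k) (List.drop k t) := by
      rw [List.drop_drop]; congr 1; omega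
    rw [hdd] at hpre
    exact hno (hpre.isInfix.trans (List.drop_suffix (c - k) (List.drop k t)).isInfix)
  simp [pvP, pvCheck, hocc]

-- ===== A side =====

theorem findA_loop_eq (t w : List Char) :
    ∀ m i, t.length + 1 - i = m → i ≤ t.length → w <+: List.drop i t →
      findA_loop t w i = pvAns t w i := by
  intro m
  induction m using Nat.strong_induction_on with
  | _ m ih =>
    intro i hm hi hocc
    have hoccb : PySem.Chars.startswith (List.drop i t) w = true :=
      (pvStartswith_iff _ _).mpr hocc
    rw [findA_loop]
    have hcons : List.range' i (t.length + 1 - i) = i :: List.range' (i + 1) (t.length - i) := by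
      rw [show t.length + 1 - i = (t.length - i) + 1 by omega]
      have h0 := @List.range'_succ i (t.length - i) 1
      simpa using h0
    split
    · rename_i htest
      have hP : pvP t w i = true := by
        simp only [pvP, pvLeft, pvCheck, hoccb, Bool.true_and]
        exact htest
      unfold pvAns
      rw [hcons]
      simp [List.find?_cons, hP]
    · rename_i htest
      have hP : pvP t w i = false := by
        rw [Bool.eq_false_iff, Ne]
        intro hcon
        simp only [pvP, pvLeft, pvCheck, hoccb, Bool.true_and] at hcon
        exact htest hcon
      by_cases hend : i = t.length
      · -- i+1 > len: findFrom is -1, and the only remaining candidate i fails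
        have hq : PySem.Chars.findFrom t w ((i : Int) + 1) = -1 :=
          pvFindFrom_gt_len t w _ (by omega)
        show (if h : PySem.Chars.findFrom t w ((i : Int) + 1) = -1 then (-1 : Int)
              else findA_loop t w (PySem.Chars.findFrom t w ((i : Int) + 1)).toNat) = pvAns t w i
        rw [dif_pos hq]
        unfold pvAns
        rw [hcons]
        subst hend
        simp [List.find?_cons, hP, Nat.sub_self]
      · have hlt : i + 1 ≤ t.length := by omega
        have hcast : ((i : Int) + 1) = ((i + 1 : Nat) : Int) := by push_cast; ring
        show (if h : PySem.Chars.findFrom t w ((i : Int) + 1) = -1 then (-1 : Int)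
              else findA_loop t w (PySem.Chars.findFrom t w ((i : Int) + 1)).toNat) = pvAns t w i
        by_cases hneg : PySem.Chars.findFrom t w ((i : Int) + 1) = -1
        · rw [dif_pos hneg]
          -- no further occurrence: everything from i on fails pvP
          rw [hcast] at hneg
          have hno : ¬ w <:+: List.drop (i + 1) t :=
            (PySem.Chars.findFrom_natCast_eq_neg_one_iff t w (i + 1) hlt).mp hneg
          have : pvAns t w i = pvAns t w (t.length + 1) := by
            apply pvAns_skip t w i (t.length + 1) (by omega) (by omega)
            intro c hic hc
            by_cases hci : c = i
            · subst hci; exact hP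
            · exact pvP_false_of_no_occ t w (i + 1) c (by omega) hno
          rw [this]
          unfold pvAns
          simp [Nat.sub_self]
        · rw [dif_neg hneg]
          have hne := hneg
          set next := PySem.Chars.findFrom t w ((i : Int) + 1) with hnext
          have hgt : i < next.toNat := pvNext_gt t w i hne
          have hle : next.toNat ≤ t.length := pvNext_le t w i hne
          have hspec := PySem.Chars.findFrom_natCast_spec t w (i + 1) hlt (by rw [← hcast]; exact hne)
          rw [← hcast] at hspec
          obtain ⟨_, hpre, hmin⟩ := hspec
          have hrec : findA_loop t w next.toNat = pvAns t w next.toNat :=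
            ih (t.length + 1 - next.toNat) (by omega) next.toNat rfl hle hpre
          rw [hrec]
          symm
          apply pvAns_skip t w i next.toNat (by omega) (by omega)
          intro c hic hc
          by_cases hci : c = i
          · subst hci; exact hP
          · have hnc : ¬ w <+: List.drop c t := hmin c (by omega) hc
            simp only [pvP, pvCheck]
            have : PySem.Chars.startswith (List.drop c t) w = false := by
              rw [Bool.eq_false_iff, Ne, pvStartswith_iff]; exact hnc
            simp [this]

theorem find_word_index_eq_pvAns (text word : String) :
    find_word_index text word =
      pvAns (PySem.Chars.lower text.toList) (PySem.Chars.lower word.toList) 0 := by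
  unfold find_word_index
  set t := PySem.Chars.lower text.toList
  set w := PySem.Chars.lower word.toList
  by_cases hf : PySem.Chars.find t w = -1
  · rw [if_pos hf]
    have hno : ¬ w <:+: t := (PySem.Chars.find_eq_neg_one_iff t w).mp hf
    have : pvAns t w 0 = pvAns t w (t.length + 1) := by
      apply pvAns_skip t w 0 (t.length + 1) (by omega) (by omega)
      intro c _ _
      exact pvP_false_of_no_occ t w 0 c (by omega) (by simpa using hno)
    rw [this]
    unfold pvAns
    simp [Nat.sub_self]
  · rw [if_neg hf]
    have hnn : 0 ≤ PySem.Chars.find t w := by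
      have := PySem.Chars.neg_one_le_find t w
      omega
    obtain ⟨hpre, hmin⟩ := PySem.Chars.find_spec (s := t) (sub := w) hnn
    have hlen : (PySem.Chars.find t w).toNat ≤ t.length := by
      have := PySem.Chars.find_le_length t w
      omega
    rw [findA_loop_eq t w (t.length + 1 - (PySem.Chars.find t w).toNat) _ rfl hlen hpre]
    symm
    apply pvAns_skip t w 0 (PySem.Chars.find t w).toNat (by omega) (by omega)
    intro c _ hc
    have hnc : ¬ w <+: List.drop c t := hmin c hc
    simp only [pvP, pvCheck]
    have : PySem.Chars.startswith (List.drop c t) w = false := by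
      rw [Bool.eq_false_iff, Ne, pvStartswith_iff]; exact hnc
    simp [this]

-- ===== B side =====

-- the list comprehension over enumerate(text), as a filter of positions
theorem pvEnum_filter (t : List Char) : ∀ (s : Nat),
    ((PySem.List.enumerate t (s : Int)).filter (fun p => p.2 == ' ')).map (fun p => p.1 + 1) =
      ((List.range t.length).filter (fun j => t.getD j ' ' == ' ')).map
        (fun j => ((s + j + 1 : Nat) : Int)) := by
  induction t with
  | nil => intro s; simp [PySem.List.enumerate_nil]
  | cons x xs ih =>
    intro s
    rw [PySem.List.enumerate_cons]
    simp only [List.length_cons, List.range_succ_eq_map, List.filter_cons, List.filter_map]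
    have hc : ((s : Int) + 1) = ((s + 1 : Nat) : Int) := by push_cast; ring
    have htail : ((PySem.List.enumerate xs ((s : Int) + 1)).filter (fun p => p.2 == ' ')).map
        (fun p => p.1 + 1) =
        ((List.range xs.length).filter (fun j => xs.getD j ' ' == ' ')).map
          (fun j => (((s + 1) + j + 1 : Nat) : Int)) := by
      rw [hc]; exact ih (s + 1)
    have hcomp : ((fun j => (x :: xs).getD j ' ' == ' ') ∘ Nat.succ) =
        (fun j => xs.getD j ' ' == ' ') := by
      funext j; simp
    have hmm : ∀ (l0 : List Nat), (List.map (fun j => ((s + j + 1 : Nat) : Int)) (List.map Nat.succ l0)) =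
        List.map (fun j => (((s + 1) + j + 1 : Nat) : Int)) l0 := by
      intro l0
      rw [List.map_map]
      apply List.map_congr_left
      intro j _
      simp only [Function.comp_apply, Nat.succ_eq_add_one]
      congr 1
      omega
    rw [hcomp]
    simp only [List.getD_cons_zero]
    cases hx : (x == ' ')
    · simp only [Bool.false_eq_true, if_false]
      rw [htail, hmm]
    · simp only [if_true, List.map_cons]
      rw [htail, hmm]
      congr 1

theorem pvStarts_eq (t : List Char) :
    (0 :: ((PySem.List.enumerate t).filter (fun p => p.2 == ' ')).map (fun p => p.1 + 1)) =
      ((List.range (t.length + 1)).filter (pvLeft t)).map (fun (c : Nat) => (c : Int)) := by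
  rw [List.range_succ_eq_map, List.filter_cons]
  have h0 : pvLeft t 0 = true := by simp [pvLeft]
  rw [List.filter_map]
  have hps : (pvLeft t ∘ Nat.succ) = fun j => t.getD j ' ' == ' ' := by
    funext j; simp [pvLeft]
  rw [hps, h0]
  simp only [if_true, List.map_cons, List.map_map]
  have henum := pvEnum_filter t 0
  simp only [Nat.cast_zero, Nat.zero_add] at henum
  rw [henum]
  simp

theorem findB_loop_map (t w : List Char) (l : List Nat) :
    findB_loop t w (l.map (fun (c : Nat) => (c : Int))) =
      match l.find? (pvCheck t w) with
      | some c => (c : Int)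
      | none => -1 := by
  induction l with
  | nil => rfl
  | cons c rest ih =>
    simp only [List.map_cons, findB_loop]
    have heq : ((c : Int) + (w.length : Int) == (t.length : Int)) = (c + w.length == t.length) := by
      simp only [beq_eq_decide]
      rw [decide_eq_decide]
      omega
    rw [Int.toNat_natCast, heq]
    have hfold : (PySem.Chars.startswith (List.drop c t) w &&
        ((c + w.length == t.length) || pvPunct (t.getD (c + w.length) ' '))) = pvCheck t w c := rfl
    rw [hfold, List.find?_cons]
    cases h : pvCheck t w c
    · simp only [h, Bool.false_eq_true, if_false, cond_false]
      exact ih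
    · simp only [h, if_true, cond_true]

theorem find_word_index_alt_eq_pvAns (text word : String) :
    find_word_index_alt text word =
      pvAns (PySem.Chars.lower text.toList) (PySem.Chars.lower word.toList) 0 := by
  simp only [find_word_index_alt]
  rw [pvStarts_eq, findB_loop_map, List.find?_filter]
  have hfun : (fun a => decide (pvLeft (PySem.Chars.lower text.toList) a = true ∧
      pvCheck (PySem.Chars.lower text.toList) (PySem.Chars.lower word.toList) a = true)) =
      pvP (PySem.Chars.lower text.toList) (PySem.Chars.lower word.toList) := by
    funext a
    simp [pvP, Bool.decide_and]
  rw [hfun]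
  unfold pvAns
  rw [Nat.sub_zero, ← List.range_eq_range']

-- ===== VERDICT (by name: the statement is the Claim_ definition above) =====
theorem find_word_index_spec : Claim_equal_find_word_index := by
  intro text word _
  unfold Spec_find_word_index
  rw [find_word_index_eq_pvAns, find_word_index_alt_eq_pvAns]
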